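-- pv_equiv track=rewrite | github.com/leonov-av/scanvus | functions_linux_inventory.py | get_os_packages_from_text_block
-- ===== SOURCE A (Python) =====
-- def get_os_packages_from_text_block(block):
--     os_packages = list()
--     in_block = False
--     for line in block.split("\n"):
--         if "==" in line:
--             in_block = False
--         if in_block:
--             os_packages.append(line)
--         if "=== packages ===" in line:
--             in_block = True
--     return os_packages
-- ===== SOURCE B (Python) =====
-- def get_os_packages_from_text_block(block):
--     lines = block.split("\n")
--     n = len(lines)
--     res = []
--     i = 0
--     while i < n:
--         if "=== packages ===" in lines[i]:
--             i += 1
--             while i < n and "==" not in lines[i]: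
--                 res.append(lines[i])
--                 i += 1
--             # do not advance: the stopping "==" line may itself be a new marker
--         else:
--             i += 1
--     return res
-- ===== Notes on version B (the rewrite author's own statement) =====
-- stated objective: alternative
-- what changed: Replaces A's per-line boolean state machine by an explicit index-based while loop that, upon finding a marker line, runs an inner while loop collecting lines until the next line containing '==' (which is re-examined as a possible new marker).
import Mathlib
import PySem

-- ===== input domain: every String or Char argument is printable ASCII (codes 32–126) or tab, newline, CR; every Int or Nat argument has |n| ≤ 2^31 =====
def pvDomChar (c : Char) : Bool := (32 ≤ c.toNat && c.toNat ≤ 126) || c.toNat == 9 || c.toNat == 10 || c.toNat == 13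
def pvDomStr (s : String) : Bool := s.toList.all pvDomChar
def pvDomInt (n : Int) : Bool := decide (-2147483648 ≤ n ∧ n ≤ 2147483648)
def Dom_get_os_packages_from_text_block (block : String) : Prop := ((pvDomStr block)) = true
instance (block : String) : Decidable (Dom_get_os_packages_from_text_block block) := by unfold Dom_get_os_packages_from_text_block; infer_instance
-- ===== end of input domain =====

-- B replaces A's per-line boolean state machine by an explicit index scan with a nested
-- collecting while loop (objective: alternative decomposition; same cost).

-- ===== PORT A =====
-- one iteration of A's for-loop: state = (os_packages, in_block)
def pvStepA (st : List String × Bool) (line : String) : List String × Bool :=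
  let st1 : List String × Bool := if PySem.Str.isIn "==" line then (st.1, false) else st
  let st2 : List String × Bool := if st1.2 then (st1.1 ++ [line], st1.2) else st1
  if PySem.Str.isIn "=== packages ===" line then (st2.1, true) else st2

def get_os_packages_from_text_block (block : String) : List String :=
  (((PySem.Str.split? block "\n").getD []).foldl pvStepA ([], false)).1

-- ===== PORT B =====
-- inner while loop: collect lines while i < n and "==" not in lines[i]; returns (res, i)
def pvAltInner (lines : List String) (i : Nat) (res : List String) : List String × Nat :=
  if h : i < lines.length then
    if PySem.Str.isIn "==" lines[i] then (res, i)
    else pvAltInner lines (i + 1) (res ++ [lines[i]])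
  else (res, i)
termination_by lines.length - i

-- the inner loop never moves the index backwards
theorem pvAltInner_le (lines : List String) (i : Nat) (res : List String) :
    i ≤ (pvAltInner lines i res).2 := by
  fun_induction pvAltInner with
  | case1 => simp
  | case2 i res h hin ih => omega
  | case3 => simp

-- outer while loop over the index i
def pvAltOuter (lines : List String) (i : Nat) (res : List String) : List String :=
  if h : i < lines.length then
    if PySem.Str.isIn "=== packages ===" lines[i] then
      pvAltOuter lines (pvAltInner lines (i + 1) res).2 (pvAltInner lines (i + 1) res).1
    else pvAltOuter lines (i + 1) res
  else res
termination_by lines.length - i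
decreasing_by
  · have := pvAltInner_le lines (i + 1) res; omega
  · omega

def get_os_packages_from_text_block_alt (block : String) : List String :=
  pvAltOuter ((PySem.Str.split? block "\n").getD []) 0 []

-- ===== PRECONDITION & SPEC =====
def Spec_get_os_packages_from_text_block (block : String) (out : List String) : Prop := out = get_os_packages_from_text_block_alt block
instance (block : String) (out : List String) : Decidable (Spec_get_os_packages_from_text_block block out) := by unfold Spec_get_os_packages_from_text_block; infer_instance

-- ===== CLAIM (what is proved, stated in full; the proofs are below) =====
def Claim_equal_get_os_packages_from_text_block : Prop := ∀ (block : String), Dom_get_os_packages_from_text_block block → Spec_get_os_packages_from_text_block block (get_os_packages_from_text_block block)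

-- ===== LEMMAS AND PROOFS =====

-- a line containing the marker also contains "=="
theorem pvMarker_has_eq (l : String) (h : PySem.Str.isIn "=== packages ===" l = true) :
    PySem.Str.isIn "==" l = true := by
  rw [PySem.Str.isIn_iff_infix] at h ⊢
  exact List.IsInfix.trans (by decide) h

-- on a line containing "==", A's step forgets the incoming boolean
theorem pvStepA_eq_line (l : String) (res : List String) (h : PySem.Str.isIn "==" l = true) :
    pvStepA (res, true) l = pvStepA (res, false) l := by
  simp at h
  simp [pvStepA, h]

-- on a line without "==", A's step in state true appends the line and stays in state true
theorem pvStepA_collect (l : String) (res : List String) (hin : PySem.Str.isIn "==" l = false) :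
    pvStepA (res, true) l = (res ++ [l], true) := by
  have hm : PySem.Str.isIn "=== packages ===" l = false := by
    cases hm : PySem.Str.isIn "=== packages ===" l with
    | false => rfl
    | true =>
      have h2 := pvMarker_has_eq _ hm
      simp at h2 hin
      simp [h2] at hin
  simp at hin hm
  simp [pvStepA, hin, hm]

-- A's step in state false on a marker line: enter the block
theorem pvStepA_false_marker (l : String) (res : List String)
    (hm : PySem.Str.isIn "=== packages ===" l = true) :
    pvStepA (res, false) l = (res, true) := by
  have heq := pvMarker_has_eq _ hm
  simp at hm heq
  simp [pvStepA, hm, heq]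

-- A's step in state false on a non-marker line: stay out of the block
theorem pvStepA_false_nomarker (l : String) (res : List String)
    (hm : PySem.Str.isIn "=== packages ===" l = false) :
    pvStepA (res, false) l = (res, false) := by
  simp at hm
  cases hin : PySem.Chars.isIn ['=', '='] l.toList <;> simp [pvStepA, hin, hm]

-- inner lemma: folding A's step in state `true` from position i equals folding it in
-- state `false` from where B's inner loop stops, with B's collected lines
theorem pvInner (lines : List String) (i : Nat) (res : List String) :
    ((lines.drop i).foldl pvStepA (res, true)).1
      = ((lines.drop (pvAltInner lines i res).2).foldl pvStepA ((pvAltInner lines i res).1, false)).1 := by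
  fun_induction pvAltInner with
  | case1 i res h hin =>
    rw [List.drop_eq_getElem_cons h, List.foldl_cons, List.foldl_cons, pvStepA_eq_line _ _ hin]
  | case2 i res h hin ih =>
    rw [List.drop_eq_getElem_cons h, List.foldl_cons, pvStepA_collect _ _ (by simpa using hin)]
    exact ih
  | case3 i res h =>
    simp [List.drop_eq_nil_of_le (by omega : lines.length ≤ i)]

-- outer lemma: A's fold in state `false` from position i equals B's outer loop from i
theorem pvOuter (lines : List String) (i : Nat) (res : List String) :
    ((lines.drop i).foldl pvStepA (res, false)).1 = pvAltOuter lines i res := by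
  fun_induction pvAltOuter with
  | case1 i res h hm ih =>
    rw [List.drop_eq_getElem_cons h, List.foldl_cons, pvStepA_false_marker _ _ hm, pvInner]
    exact ih
  | case2 i res h hm ih =>
    rw [List.drop_eq_getElem_cons h, List.foldl_cons,
        pvStepA_false_nomarker _ _ (by simpa using hm)]
    exact ih
  | case3 i res h =>
    simp [List.drop_eq_nil_of_le (by omega : lines.length ≤ i)]

-- ===== VERDICT (by name: the statement is the Claim_ definition above) =====
theorem get_os_packages_from_text_block_spec : Claim_equal_get_os_packages_from_text_block := by
  intro block _
  unfold Spec_get_os_packages_from_text_block get_os_packages_from_text_block get_os_packages_from_text_block_alt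
  simpa using pvOuter ((PySem.Str.split? block "\n").getD []) 0 []
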